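-- pv_equiv track=rewrite | github.com/DPNT-Sourcecode/CHK-ahvh01 | lib/solutions/CHK/checkout_solution.py | process_freebies
-- ===== SOURCE A (Python) =====
-- PRODUCT_PRICES = {
--     "A": 50,
--     "B": 30,
--     "C": 20,
--     "D": 15,
--     "E": 40,
--     "F": 10,
--     # ---
--     "G": 20,
--     "H": 10,
--     "I": 35,
--     "J": 60,
--     "K": 80,
--     "L": 90,
--     "M": 15,
--     "N": 40,
--     "O": 10,
--     "P": 50,
--     "Q": 30,
--     "R": 50,
--     "S": 30,
--     "T": 20,
--     "U": 40,
--     "V": 50,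
--     "W": 20,
--     "X": 90,
--     "Y": 10,
--     "Z": 50,
-- }
--
-- FREEBIES_OFFERS = {
--     # Product: Amount, Freebie_Product, Freebie_Amount
--     "E": [2, "B", 1],
--     "F": [2, "F", 1],
--     "N": [3, "M", 1],
--     "R": [3, "Q", 1],
--     "U": [3, "U", 1],
-- }
--
-- def process_freebies(cart, total):
--     for item, offer in FREEBIES_OFFERS.items():
--         if cart.get(item):
--             item_amount_required, freebie_product, freebies_amount = offer
--             if item == freebie_product:
--                 item_amount_required += freebies_amount
--
--             while True:
--                 if (
--                     cart[item] // item_amount_required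
--                     and cart[freebie_product] // freebies_amount
--                 ):
--                     if item == freebie_product:
--                         total += (
--                             item_amount_required - freebies_amount
--                         ) * PRODUCT_PRICES[item]
--                         cart[item] -= item_amount_required
--                     else:
--                         total += item_amount_required * PRODUCT_PRICES[item]
--                         cart[item] -= item_amount_required
--                         cart[freebie_product] -= freebies_amount
--                 else:
--                     break
--
--     return total, cart
-- ===== SOURCE B (Python) =====
-- PRODUCT_PRICES = {
--     "A": 50, "B": 30, "C": 20, "D": 15, "E": 40, "F": 10,
--     "G": 20, "H": 10, "I": 35, "J": 60, "K": 80, "L": 90,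
--     "M": 15, "N": 40, "O": 10, "P": 50, "Q": 30, "R": 50,
--     "S": 30, "T": 20, "U": 40, "V": 50, "W": 20, "X": 90,
--     "Y": 10, "Z": 50,
-- }
--
-- FREEBIES_OFFERS = {
--     # Product: Amount, Freebie_Product, Freebie_Amount
--     "E": [2, "B", 1],
--     "F": [2, "F", 1],
--     "N": [3, "M", 1],
--     "R": [3, "Q", 1],
--     "U": [3, "U", 1],
-- }
--
-- def process_freebies(cart, total):
--     # closed form per offer: number of loop rounds computed by integer division
--     for item, (req, freebie, famt) in FREEBIES_OFFERS.items():
--         qty = cart.get(item, 0)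
--         if not qty:
--             continue
--         if item == freebie:
--             k = qty // (req + famt)
--             if k != 0:
--                 total += k * req * PRODUCT_PRICES[item]
--                 cart[item] -= k * (req + famt)
--         else:
--             k = min(qty // req, cart.get(freebie, 0) // famt)
--             if k > 0:
--                 total += k * req * PRODUCT_PRICES[item]
--                 cart[item] -= k * req
--                 cart[freebie] -= k * famt
--     return total, cart
-- ===== Notes on version B (the rewrite author's own statement) =====
-- stated objective: alternative
-- what changed: A removes freebies one round at a time in a while loop; B settles each offer in one step, computing the number of rounds in closed form with integer division and min.
-- outside the precondition, e.g. on process_freebies({'E': -1, 'B': 5}, 0): A returns (400, {'E': -11, 'B': 0}), B returns (0, {'E': -1, 'B': 5}); on process_freebies({'E': 2}, 0): A raises KeyError, B returns (0, {'E': 2})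
import Mathlib
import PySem

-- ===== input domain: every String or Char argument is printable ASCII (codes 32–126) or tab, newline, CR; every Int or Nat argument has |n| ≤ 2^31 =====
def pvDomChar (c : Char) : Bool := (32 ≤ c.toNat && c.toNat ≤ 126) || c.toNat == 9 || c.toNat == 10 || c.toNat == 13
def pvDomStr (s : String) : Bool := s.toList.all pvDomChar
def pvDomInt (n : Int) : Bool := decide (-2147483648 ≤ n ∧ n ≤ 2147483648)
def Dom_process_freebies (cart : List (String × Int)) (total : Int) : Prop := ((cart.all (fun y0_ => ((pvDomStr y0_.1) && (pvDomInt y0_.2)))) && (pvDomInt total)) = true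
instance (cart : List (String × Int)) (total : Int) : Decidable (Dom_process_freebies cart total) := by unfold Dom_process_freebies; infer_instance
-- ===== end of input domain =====

-- B replaces A's one-freebie-at-a-time while loop by a closed-form iteration count
-- (integer division / min) per offer. Both programs mutate `cart` in place in Python;
-- the ports return the updated association list, so the mutation is part of the result.

-- shared module-level constants (PRODUCT_PRICES, FREEBIES_OFFERS)
def pfPrices : PySem.Dict String Int := PySem.Dict.ofList
  [("A",50),("B",30),("C",20),("D",15),("E",40),("F",10),
   ("G",20),("H",10),("I",35),("J",60),("K",80),("L",90),
   ("M",15),("N",40),("O",10),("P",50),("Q",30),("R",50),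
   ("S",30),("T",20),("U",40),("V",50),("W",20),("X",90),
   ("Y",10),("Z",50)]

-- FREEBIES_OFFERS as (item, amount_required, freebie_product, freebie_amount), in dict order
def pfOffers : List (String × Int × String × Int) :=
  [("E",2,"B",1),("F",2,"F",1),("N",3,"M",1),("R",3,"Q",1),("U",3,"U",1)]

-- ===== PORT A =====
-- A's `while True` loop; `r` is the already-adjusted item_amount_required.
-- `cart[item]`/`cart[freebie_product]` are ported as getD _ 0: inside the loop `item`
-- is present, and a 0 default makes the port break exactly where Pre_ admits the input
-- (Python raises KeyError on a missing freebie key only outside Pre_).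
-- The fuel argument only guards divergence (A loops forever on negative quantities,
-- outside Pre_); on Pre_ inputs it is never exhausted.
def pfLoopA (item : String) (r : Int) (fb : String) (famt : Int) (price : Int) :
    Nat → Int → PySem.Dict String Int → Int × PySem.Dict String Int
  | 0, total, cart => (total, cart)
  | fuel + 1, total, cart =>
    if PySem.Int.floordiv (cart.getD item 0) r ≠ 0 ∧
       PySem.Int.floordiv (cart.getD fb 0) famt ≠ 0 then
      if item = fb then
        pfLoopA item r fb famt price fuel (total + (r - famt) * price)
          (cart.insert item (cart.getD item 0 - r))
      else
        pfLoopA item r fb famt price fuel (total + r * price)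
          ((cart.insert item (cart.getD item 0 - r)).insert fb (cart.getD fb 0 - famt))
    else (total, cart)

-- one pass of A's outer `for item, offer in FREEBIES_OFFERS.items()` body
def pfStepA (st : Int × PySem.Dict String Int) (off : String × Int × String × Int) :
    Int × PySem.Dict String Int :=
  match st.2.get? off.1 with
  | none => st
  | some v =>
    if v ≠ 0 then
      let r := if off.1 = off.2.2.1 then off.2.1 + off.2.2.2 else off.2.1
      pfLoopA off.1 r off.2.2.1 off.2.2.2 (pfPrices.getD off.1 0)
        ((st.2.getD off.1 0).toNat + 1) st.1 st.2
    else st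

def process_freebies (cart : List (String × Int)) (total : Int) : Int × (List (String × Int)) :=
  let st := pfOffers.foldl pfStepA (total, PySem.Dict.ofList cart)
  (st.1, st.2.items)

-- ===== PORT B =====
-- one pass of B's loop body: closed-form iteration count k per offer
def pfStepB (st : Int × PySem.Dict String Int) (off : String × Int × String × Int) :
    Int × PySem.Dict String Int :=
  let qty := st.2.getD off.1 0
  if qty ≠ 0 then
    if off.1 = off.2.2.1 then
      let k := PySem.Int.floordiv qty (off.2.1 + off.2.2.2)
      if k ≠ 0 then
        (st.1 + k * off.2.1 * pfPrices.getD off.1 0,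
         st.2.insert off.1 (qty - k * (off.2.1 + off.2.2.2)))
      else st
    else
      let k := min (PySem.Int.floordiv qty off.2.1)
                   (PySem.Int.floordiv (st.2.getD off.2.2.1 0) off.2.2.2)
      if 0 < k then
        (st.1 + k * off.2.1 * pfPrices.getD off.1 0,
         (st.2.insert off.1 (qty - k * off.2.1)).insert off.2.2.1
           (st.2.getD off.2.2.1 0 - k * off.2.2.2))
      else st
  else st

def process_freebies_alt (cart : List (String × Int)) (total : Int) : Int × (List (String × Int)) :=
  let st := pfOffers.foldl pfStepB (total, PySem.Dict.ofList cart)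
  (st.1, st.2.items)

-- ===== PRECONDITION & SPEC =====
-- Pre_ restricts to the natural domain: the offer-relevant products carry nonnegative
-- quantities (on negative quantities A diverges or, where it happens to return, its value
-- is an artefact of the runaway loop), and each freebie product of a triggered two-product
-- offer is present in the cart (otherwise A raises KeyError).
def Pre_process_freebies (cart : List (String × Int)) (total : Int) : Prop :=
  (∀ p ∈ cart, p.1 ∈ ["E","B","F","N","M","R","Q","U"] → 0 ≤ p.2) ∧
  (2 ≤ (PySem.Dict.ofList cart).getD "E" 0 → (PySem.Dict.ofList cart).contains "B" = true) ∧
  (3 ≤ (PySem.Dict.ofList cart).getD "N" 0 → (PySem.Dict.ofList cart).contains "M" = true) ∧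
  (3 ≤ (PySem.Dict.ofList cart).getD "R" 0 → (PySem.Dict.ofList cart).contains "Q" = true)
instance (cart : List (String × Int)) (total : Int) : Decidable (Pre_process_freebies cart total) := by
  unfold Pre_process_freebies; infer_instance

def pvWitness_process_freebies : (List (String × Int)) × Int :=
  ([("E", 5), ("B", 2), ("F", 7), ("U", 9), ("X", 1)], 100)

def Spec_process_freebies (cart : List (String × Int)) (total : Int) (out : Int × (List (String × Int))) : Prop := out = process_freebies_alt cart total
instance (cart : List (String × Int)) (total : Int) (out : Int × (List (String × Int))) : Decidable (Spec_process_freebies cart total out) := by unfold Spec_process_freebies; infer_instance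

-- ===== CLAIM (what is proved, stated in full; the proofs are below) =====
def Claim_equal_process_freebies : Prop := ∀ (cart : List (String × Int)) (total : Int), Dom_process_freebies cart total → Pre_process_freebies cart total → Spec_process_freebies cart total (process_freebies cart total)

-- ===== LEMMAS AND PROOFS =====

theorem pf_getD_congr {d d' : PySem.Dict String Int} {k : String}
    (h : d.get? k = d'.get? k) : d.getD k 0 = d'.getD k 0 := by
  rw [PySem.Dict.getD_eq_get?_getD _ _ _, PySem.Dict.getD_eq_get?_getD _ _ _, h]

-- members of (ofList l).items come from l
theorem pf_mem_items_foldl {l : List (String × Int)} {d : PySem.Dict String Int}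
    {p : String × Int}
    (h : p ∈ (l.foldl (fun d q => d.insert q.1 q.2) d).items) :
    p ∈ l ∨ p ∈ d.items := by
  induction l generalizing d with
  | nil => exact Or.inr h
  | cons x l ih =>
    rcases ih (d := d.insert x.1 x.2) h with h1 | h2
    · exact Or.inl (List.mem_cons_of_mem _ h1)
    · rcases (PySem.Dict.mem_items_insert _ _ _ _).1 h2 with h3 | h3
      · exact Or.inl (by rw [h3]; simp)
      · exact Or.inr h3.1

theorem pf_getD_ofList_nonneg {cart : List (String × Int)}
    (H : ∀ p ∈ cart, p.1 ∈ ["E","B","F","N","M","R","Q","U"] → 0 ≤ p.2)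
    (s : String) (hs : s ∈ ["E","B","F","N","M","R","Q","U"]) :
    0 ≤ (PySem.Dict.ofList cart).getD s 0 := by
  cases hg : (PySem.Dict.ofList cart).get? s with
  | none => rw [PySem.Dict.getD_of_get?_eq_none _ 0 hg]
  | some v =>
    rw [PySem.Dict.getD_of_get?_eq_some _ 0 hg]
    have hmem := PySem.Dict.mem_items_of_get?_eq_some _ hg
    have : (s, v) ∈ cart ∨ (s, v) ∈ (PySem.Dict.empty : PySem.Dict String Int).items :=
      pf_mem_items_foldl hmem
    rcases this with h | h
    · exact H _ h hs
    · simp [PySem.Dict.empty] at h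

-- inserting at k then later at k' ≠ k and finally again at k collapses the first k'-insert,
-- provided k is already a key of d (all our inserts overwrite the triggering item's key)
theorem pf_insert_swap (d : PySem.Dict String Int) (k k' : String) (v v' w : Int)
    (hne : k ≠ k') (hk : d.contains k = true) :
    ((d.insert k' v').insert k v).insert k' w = (d.insert k v).insert k' w := by
  have hbne : (k' == k) = false := by simpa using Ne.symm hne
  have hbne' : (k == k') = false := by simpa using hne
  apply PySem.Dict.ext
  have hck : (d.insert k' v').contains k = true := by
    rw [PySem.Dict.contains_insert, hbne', hk]; rfl
  by_cases hc' : d.contains k' = true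
  · have h1 := PySem.Dict.items_insert_of_contains (d := d) (v := v') hc'
    have hck' : ((d.insert k' v').insert k v).contains k' = true := by
      rw [PySem.Dict.contains_insert, hbne, PySem.Dict.contains_insert]; simp
    have hck2 : (d.insert k v).contains k' = true := by
      rw [PySem.Dict.contains_insert, hbne, hc']; rfl
    rw [PySem.Dict.items_insert_of_contains _ _ hck',
        PySem.Dict.items_insert_of_contains _ _ hck,
        PySem.Dict.items_insert_of_contains _ _ hck2,
        PySem.Dict.items_insert_of_contains _ _ hk, h1,
        List.map_map, List.map_map, List.map_map]
    apply List.map_congr_left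
    intro p _
    by_cases h1 : p.1 = k' <;> by_cases h2 : p.1 = k <;>
      simp [Function.comp, h1, h2, hbne, hbne'] <;> simp_all
  · have hc'f : d.contains k' = false := by simpa using hc'
    have hkeys : k' ∉ d.items.map Prod.fst := by
      intro hm
      have : d.contains k' = true := by
        rw [PySem.Dict.contains_iff_mem_keys]; simpa [PySem.Dict.keys] using hm
      simp [this] at hc'f
    have h1 := PySem.Dict.items_insert_of_not_contains (d := d) (v := v') hc'f
    have hck' : ((d.insert k' v').insert k v).contains k' = true := by
      rw [PySem.Dict.contains_insert, hbne, PySem.Dict.contains_insert]; simp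
    have hck2 : (d.insert k v).contains k' = false := by
      rw [PySem.Dict.contains_insert, hbne, hc'f]; rfl
    rw [PySem.Dict.items_insert_of_contains _ _ hck',
        PySem.Dict.items_insert_of_contains _ _ hck,
        PySem.Dict.items_insert_of_not_contains _ _ hck2,
        PySem.Dict.items_insert_of_contains _ _ hk, h1,
        List.map_append, List.map_append]
    simp only [List.map_map]
    congr 1
    · apply List.map_congr_left
      intro p hp
      have hp1 : p.1 ≠ k' := fun h => hkeys (h ▸ List.mem_map_of_mem hp)
      by_cases h2 : p.1 = k <;> simp [Function.comp, hp1, h2, hbne, hbne']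
    · simp [Function.comp, hbne', Ne.symm hne]

-- floor-division arithmetic helpers (positive divisor)
theorem pf_fd_eq (a r : Int) (hr : 0 < r) : PySem.Int.floordiv a r = a / r :=
  PySem.Int.floordiv_eq_ediv_of_pos hr

theorem pf_fd_zero (r : Int) (hr : 0 < r) : PySem.Int.floordiv 0 r = 0 := by
  rw [pf_fd_eq _ _ hr]; simp

theorem pf_fd_nonneg (a r : Int) (ha : 0 ≤ a) (hr : 0 < r) : 0 ≤ PySem.Int.floordiv a r := by
  rw [pf_fd_eq _ _ hr]; exact Int.ediv_nonneg ha hr.le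

theorem pf_fd_ne_zero_iff (a r : Int) (hr : 0 < r) (ha : 0 ≤ a) :
    PySem.Int.floordiv a r ≠ 0 ↔ r ≤ a := by
  rw [pf_fd_eq a r hr]
  constructor
  · intro h
    by_contra hlt
    push_neg at hlt
    exact h (Int.ediv_eq_zero_of_lt ha hlt)
  · intro h h0
    have h1 : 1 ≤ a / r := by rw [Int.le_ediv_iff_mul_le hr]; omega
    omega

theorem pf_fd_sub (a r : Int) (hr : 0 < r) :
    PySem.Int.floordiv (a - r) r = PySem.Int.floordiv a r - 1 := by
  rw [pf_fd_eq _ _ hr, pf_fd_eq _ _ hr]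
  have h := Int.add_mul_ediv_right a (-1) (show r ≠ 0 by omega)
  have h2 : a - r = a + (-1) * r := by ring
  rw [h2, h]
  ring


-- A's while loop for a self-offer (item == freebie_product) computes the closed form
theorem pf_loop_self (item : String) (r famt price : Int)
    (hfamt : 1 ≤ famt) (hr : famt + 1 ≤ r) :
    ∀ (fuel : Nat) (total : Int) (cart : PySem.Dict String Int),
      0 ≤ cart.getD item 0 → (cart.getD item 0).toNat ≤ fuel →
      pfLoopA item r item famt price fuel total cart =
        (if PySem.Int.floordiv (cart.getD item 0) r = 0 then (total, cart)
         else (total + PySem.Int.floordiv (cart.getD item 0) r * (r - famt) * price,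
               cart.insert item (cart.getD item 0 - PySem.Int.floordiv (cart.getD item 0) r * r))) := by
  intro fuel
  induction fuel with
  | zero =>
    intro total cart ha hf
    have h0 : cart.getD item 0 = 0 := by omega
    rw [h0, pf_fd_zero r (by omega)]
    simp [pfLoopA]
  | succ n ih =>
    intro total cart ha hf
    have hr0 : (0:Int) < r := by omega
    by_cases h0 : PySem.Int.floordiv (cart.getD item 0) r = 0
    · simp [pfLoopA, h0]
    · have har : r ≤ cart.getD item 0 := (pf_fd_ne_zero_iff _ _ hr0 ha).1 h0
      have h2 : PySem.Int.floordiv (cart.getD item 0) famt ≠ 0 :=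
        (pf_fd_ne_zero_iff _ _ (by omega) ha).2 (by omega)
      simp only [pfLoopA, if_pos (And.intro h0 h2), if_pos rfl, if_true]
      have hga : (cart.insert item (cart.getD item 0 - r)).getD item 0 = cart.getD item 0 - r :=
        PySem.Dict.getD_insert_self _ _ _ _
      have ih' := ih (total + (r - famt) * price) (cart.insert item (cart.getD item 0 - r))
        (by rw [hga]; omega) (by rw [hga]; omega)
      rw [ih', hga, pf_fd_sub _ _ hr0]
      by_cases h1 : PySem.Int.floordiv (cart.getD item 0) r = 1
      · have hc : PySem.Int.floordiv (cart.getD item 0) r - 1 = 0 := by omega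
        rw [if_pos hc, if_neg h0, h1]
        simp only [Prod.mk.injEq]
        constructor <;> [ring_nf; rw [one_mul]]
      · have hc : ¬ PySem.Int.floordiv (cart.getD item 0) r - 1 = 0 := by omega
        rw [if_neg hc, if_neg h0, PySem.Dict.insert_insert_self]
        simp only [Prod.mk.injEq]
        constructor
        · ring
        · congr 1; ring

-- A's while loop for a two-product offer computes the closed form
theorem pf_loop_nonself (item fb : String) (r famt price : Int)
    (hne : item ≠ fb) (hr : 1 ≤ r) (hfamt : 1 ≤ famt) :
    ∀ (fuel : Nat) (total : Int) (cart : PySem.Dict String Int),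
      0 ≤ cart.getD item 0 → 0 ≤ cart.getD fb 0 → (cart.getD item 0).toNat ≤ fuel →
      pfLoopA item r fb famt price fuel total cart =
        (if min (PySem.Int.floordiv (cart.getD item 0) r) (PySem.Int.floordiv (cart.getD fb 0) famt) = 0
         then (total, cart)
         else (total + min (PySem.Int.floordiv (cart.getD item 0) r) (PySem.Int.floordiv (cart.getD fb 0) famt) * r * price,
               (cart.insert item (cart.getD item 0 - min (PySem.Int.floordiv (cart.getD item 0) r) (PySem.Int.floordiv (cart.getD fb 0) famt) * r)).insert fb
                 (cart.getD fb 0 - min (PySem.Int.floordiv (cart.getD item 0) r) (PySem.Int.floordiv (cart.getD fb 0) famt) * famt))) := by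
  intro fuel
  induction fuel with
  | zero =>
    intro total cart ha hb hf
    have h0 : cart.getD item 0 = 0 := by omega
    have hb0 : 0 ≤ PySem.Int.floordiv (cart.getD fb 0) famt := pf_fd_nonneg _ _ hb (by omega)
    have hminz : min (0:Int) (PySem.Int.floordiv (cart.getD fb 0) famt) = 0 := by omega
    rw [h0, pf_fd_zero r (by omega), if_pos hminz]
    simp [pfLoopA]
  | succ n ih =>
    intro total cart ha hb hf
    have hr0 : (0:Int) < r := by omega
    have hf0 : (0:Int) < famt := by omega
    have hbn : 0 ≤ PySem.Int.floordiv (cart.getD fb 0) famt := pf_fd_nonneg _ _ hb hf0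
    have han : 0 ≤ PySem.Int.floordiv (cart.getD item 0) r := pf_fd_nonneg _ _ ha hr0
    by_cases hC : PySem.Int.floordiv (cart.getD item 0) r ≠ 0 ∧
        PySem.Int.floordiv (cart.getD fb 0) famt ≠ 0
    · obtain ⟨h0, h2⟩ := hC
      have har : r ≤ cart.getD item 0 := (pf_fd_ne_zero_iff _ _ hr0 ha).1 h0
      have hbf : famt ≤ cart.getD fb 0 := (pf_fd_ne_zero_iff _ _ hf0 hb).1 h2
      simp only [pfLoopA, if_pos (And.intro h0 h2), if_neg hne]
      have hga : ((cart.insert item (cart.getD item 0 - r)).insert fb (cart.getD fb 0 - famt)).getD item 0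
          = cart.getD item 0 - r := by
        rw [PySem.Dict.getD_insert_of_ne _ _ _ hne, PySem.Dict.getD_insert_self]
      have hgb : ((cart.insert item (cart.getD item 0 - r)).insert fb (cart.getD fb 0 - famt)).getD fb 0
          = cart.getD fb 0 - famt := PySem.Dict.getD_insert_self _ _ _ _
      have ih' := ih (total + r * price)
        ((cart.insert item (cart.getD item 0 - r)).insert fb (cart.getD fb 0 - famt))
        (by rw [hga]; omega) (by rw [hgb]; omega) (by rw [hga]; omega)
      rw [ih', hga, hgb, pf_fd_sub _ _ hr0, pf_fd_sub _ _ hf0]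
      have hmin : min (PySem.Int.floordiv (cart.getD item 0) r - 1)
          (PySem.Int.floordiv (cart.getD fb 0) famt - 1)
          = min (PySem.Int.floordiv (cart.getD item 0) r) (PySem.Int.floordiv (cart.getD fb 0) famt) - 1 := by
        omega
      rw [hmin]
      set k := min (PySem.Int.floordiv (cart.getD item 0) r) (PySem.Int.floordiv (cart.getD fb 0) famt) with hk
      have hk1 : 1 ≤ k := by omega
      by_cases h1 : k = 1
      · have hc : k - 1 = 0 := by omega
        have hc0 : ¬ k = 0 := by omega
        rw [if_pos hc, if_neg hc0, h1]
        simp only [Prod.mk.injEq]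
        constructor <;> [ring_nf; (congr 1 <;> [(congr 1; ring); ring])]
      · have hc : ¬ k - 1 = 0 := by omega
        have hc0 : ¬ k = 0 := by omega
        rw [if_neg hc, if_neg hc0]
        have hsw : ((((cart.insert item (cart.getD item 0 - r)).insert fb (cart.getD fb 0 - famt)).insert item
              (cart.getD item 0 - r - (k - 1) * r)).insert fb (cart.getD fb 0 - famt - (k - 1) * famt))
            = ((cart.insert item (cart.getD item 0 - r)).insert item
              (cart.getD item 0 - r - (k - 1) * r)).insert fb (cart.getD fb 0 - famt - (k - 1) * famt) := by
          rw [pf_insert_swap _ item fb _ _ _ hne (PySem.Dict.contains_insert_self _ _ _)]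
        rw [hsw, PySem.Dict.insert_insert_self]
        simp only [Prod.mk.injEq]
        constructor
        · ring
        · congr 1 <;> [(congr 1; ring); ring]
    · push_neg at hC
      have hk0 : min (PySem.Int.floordiv (cart.getD item 0) r) (PySem.Int.floordiv (cart.getD fb 0) famt) = 0 := by
        by_cases h0 : PySem.Int.floordiv (cart.getD item 0) r = 0
        · omega
        · have := hC h0; omega
      rw [if_pos hk0]
      have : ¬ (PySem.Int.floordiv (cart.getD item 0) r ≠ 0 ∧
          PySem.Int.floordiv (cart.getD fb 0) famt ≠ 0) := by tauto
      simp only [pfLoopA, if_neg this]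

-- one offer pass: A's loop equals B's closed form, self-offer case
theorem pf_step_eq_self (item : String) (req famt : Int) (st : Int × PySem.Dict String Int)
    (hreq : 1 ≤ req) (hfamt : 1 ≤ famt) (ha : 0 ≤ st.2.getD item 0) :
    pfStepA st (item, req, item, famt) = pfStepB st (item, req, item, famt) := by
  unfold pfStepA pfStepB
  cases hg : st.2.get? item with
  | none =>
    have h0 : st.2.getD item 0 = 0 := PySem.Dict.getD_of_get?_eq_none _ 0 hg
    simp [h0]
  | some v =>
    have h0 : st.2.getD item 0 = v := PySem.Dict.getD_of_get?_eq_some _ 0 hg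
    by_cases hv : v = 0
    · simp [hv, h0]
    · simp only [hv, if_pos rfl, if_neg, ne_eq, not_false_eq_true, if_true, h0]
      have hl := pf_loop_self item (req + famt) famt (pfPrices.getD item 0) hfamt (by omega)
        (v.toNat + 1) st.1 st.2 (h0 ▸ ha) (by rw [h0]; omega)
      rw [h0] at hl
      rw [hl]
      by_cases hk : PySem.Int.floordiv v (req + famt) = 0
      · simp [hk]
      · rw [if_neg hk, if_pos hk]
        exact Prod.ext_iff.2 ⟨by ring, rfl⟩

-- one offer pass: A's loop equals B's closed form, two-product case
theorem pf_step_eq_nonself (item fb : String) (req famt : Int) (st : Int × PySem.Dict String Int)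
    (hne : item ≠ fb) (hreq : 1 ≤ req) (hfamt : 1 ≤ famt)
    (ha : 0 ≤ st.2.getD item 0) (hb : 0 ≤ st.2.getD fb 0) :
    pfStepA st (item, req, fb, famt) = pfStepB st (item, req, fb, famt) := by
  unfold pfStepA pfStepB
  cases hg : st.2.get? item with
  | none =>
    have h0 : st.2.getD item 0 = 0 := PySem.Dict.getD_of_get?_eq_none _ 0 hg
    simp [h0]
  | some v =>
    have h0 : st.2.getD item 0 = v := PySem.Dict.getD_of_get?_eq_some _ 0 hg
    by_cases hv : v = 0
    · simp [hv, h0]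
    · simp only [hv, if_pos rfl, if_neg hne, ne_eq, not_false_eq_true, if_true, h0]
      have hl := pf_loop_nonself item fb req famt (pfPrices.getD item 0) hne hreq hfamt
        (v.toNat + 1) st.1 st.2 (h0 ▸ ha) hb (by rw [h0]; omega)
      rw [h0] at hl
      rw [hl]
      have hkn : 0 ≤ min (PySem.Int.floordiv v req) (PySem.Int.floordiv (st.2.getD fb 0) famt) := by
        have h1 := pf_fd_nonneg v req (h0 ▸ ha) (by omega)
        have h2 := pf_fd_nonneg (st.2.getD fb 0) famt hb (by omega)
        omega
      by_cases hk : min (PySem.Int.floordiv v req) (PySem.Int.floordiv (st.2.getD fb 0) famt) = 0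
      · rw [if_pos hk, if_neg (show ¬ (0:Int) < min (PySem.Int.floordiv v req) (PySem.Int.floordiv (st.2.getD fb 0) famt) by omega)]
      · rw [if_neg hk, if_pos (show (0:Int) < min (PySem.Int.floordiv v req) (PySem.Int.floordiv (st.2.getD fb 0) famt) by omega)]

-- B's pass leaves every key other than the offer's two products untouched
theorem pf_stepB_get? (st : Int × PySem.Dict String Int) (off : String × Int × String × Int)
    (k : String) (h1 : k ≠ off.1) (h2 : k ≠ off.2.2.1) :
    (pfStepB st off).2.get? k = st.2.get? k := by
  unfold pfStepB
  by_cases hq : st.2.getD off.1 0 = 0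
  · simp [hq]
  · by_cases hs : off.1 = off.2.2.1
    · have hq' : ¬ st.2.getD off.2.2.1 0 = 0 := hs ▸ hq
      by_cases hk : PySem.Int.floordiv (st.2.getD off.2.2.1 0) (off.2.1 + off.2.2.2) = 0
      · simp [hq', hs, hk]
      · simp [hq', hs, hk, PySem.Dict.get?_insert_of_ne _ _ h2]
    · by_cases hk : 0 < min (PySem.Int.floordiv (st.2.getD off.1 0) off.2.1)
          (PySem.Int.floordiv (st.2.getD off.2.2.1 0) off.2.2.2)
      · simp [hq, hs, hk, PySem.Dict.get?_insert_of_ne _ _ h1, PySem.Dict.get?_insert_of_ne _ _ h2]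
      · simp [hq, hs, hk]

-- ===== VERDICT (by name: the statement is the Claim_ definition above) =====
theorem process_freebies_spec : Claim_equal_process_freebies := by
  intro cart total _hDom hPre
  obtain ⟨H, -, -, -⟩ := hPre
  unfold Spec_process_freebies process_freebies process_freebies_alt pfOffers
  simp only [List.foldl]
  have hnn := pf_getD_ofList_nonneg H
  set d0 := PySem.Dict.ofList cart with hd0
  -- offer E (freebie B)
  have e1 : pfStepA (total, d0) ("E", 2, "B", 1) = pfStepB (total, d0) ("E", 2, "B", 1) :=
    pf_step_eq_nonself "E" "B" 2 1 (total, d0) (by decide) (by omega) (by omega)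
      (hnn "E" (by simp)) (hnn "B" (by simp))
  rw [e1]
  set s1 := pfStepB (total, d0) ("E", 2, "B", 1) with hs1
  have p1 : ∀ x : String, x ≠ "E" → x ≠ "B" → s1.2.get? x = d0.get? x := fun x hx1 hx2 =>
    pf_stepB_get? (total, d0) ("E", 2, "B", 1) x hx1 hx2
  -- offer F (self)
  have hF1 : 0 ≤ s1.2.getD "F" 0 := by
    rw [pf_getD_congr (p1 "F" (by decide) (by decide))]; exact hnn "F" (by simp)
  have e2 : pfStepA s1 ("F", 2, "F", 1) = pfStepB s1 ("F", 2, "F", 1) :=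
    pf_step_eq_self "F" 2 1 s1 (by omega) (by omega) hF1
  rw [e2]
  set s2 := pfStepB s1 ("F", 2, "F", 1) with hs2
  have p2 : ∀ x : String, x ≠ "F" → s2.2.get? x = s1.2.get? x := fun x hx =>
    pf_stepB_get? s1 ("F", 2, "F", 1) x hx hx
  -- offer N (freebie M)
  have hN2 : 0 ≤ s2.2.getD "N" 0 := by
    rw [pf_getD_congr (p2 "N" (by decide)), pf_getD_congr (p1 "N" (by decide) (by decide))]
    exact hnn "N" (by simp)
  have hM2 : 0 ≤ s2.2.getD "M" 0 := by
    rw [pf_getD_congr (p2 "M" (by decide)), pf_getD_congr (p1 "M" (by decide) (by decide))]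
    exact hnn "M" (by simp)
  have e3 : pfStepA s2 ("N", 3, "M", 1) = pfStepB s2 ("N", 3, "M", 1) :=
    pf_step_eq_nonself "N" "M" 3 1 s2 (by decide) (by omega) (by omega) hN2 hM2
  rw [e3]
  set s3 := pfStepB s2 ("N", 3, "M", 1) with hs3
  have p3 : ∀ x : String, x ≠ "N" → x ≠ "M" → s3.2.get? x = s2.2.get? x := fun x hx1 hx2 =>
    pf_stepB_get? s2 ("N", 3, "M", 1) x hx1 hx2
  -- offer R (freebie Q)
  have hR3 : 0 ≤ s3.2.getD "R" 0 := by
    rw [pf_getD_congr (p3 "R" (by decide) (by decide)), pf_getD_congr (p2 "R" (by decide)),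
      pf_getD_congr (p1 "R" (by decide) (by decide))]
    exact hnn "R" (by simp)
  have hQ3 : 0 ≤ s3.2.getD "Q" 0 := by
    rw [pf_getD_congr (p3 "Q" (by decide) (by decide)), pf_getD_congr (p2 "Q" (by decide)),
      pf_getD_congr (p1 "Q" (by decide) (by decide))]
    exact hnn "Q" (by simp)
  have e4 : pfStepA s3 ("R", 3, "Q", 1) = pfStepB s3 ("R", 3, "Q", 1) :=
    pf_step_eq_nonself "R" "Q" 3 1 s3 (by decide) (by omega) (by omega) hR3 hQ3
  rw [e4]
  set s4 := pfStepB s3 ("R", 3, "Q", 1) with hs4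
  have p4 : ∀ x : String, x ≠ "R" → x ≠ "Q" → s4.2.get? x = s3.2.get? x := fun x hx1 hx2 =>
    pf_stepB_get? s3 ("R", 3, "Q", 1) x hx1 hx2
  -- offer U (self)
  have hU4 : 0 ≤ s4.2.getD "U" 0 := by
    rw [pf_getD_congr (p4 "U" (by decide) (by decide)), pf_getD_congr (p3 "U" (by decide) (by decide)),
      pf_getD_congr (p2 "U" (by decide)), pf_getD_congr (p1 "U" (by decide) (by decide))]
    exact hnn "U" (by simp)
  have e5 : pfStepA s4 ("U", 3, "U", 1) = pfStepB s4 ("U", 3, "U", 1) :=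
    pf_step_eq_self "U" 3 1 s4 (by omega) (by omega) hU4
  rw [e5]
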